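-- pv_equiv track=rewrite | github.com/Raffaello0228/AITest_MP | tools/generate_test_comparison_csv.py | compute_constraint_priority_mapping
-- ===== SOURCE A (Python) =====
-- from collections import defaultdict
-- from typing import Dict, List, Any
--
-- def compute_constraint_priority_mapping(constraint_config: Dict[str, List[Dict[str, Any]]]) -> Dict[int, str]:
--     """
--     计算限制优先级到限制类型名称的映射：
--     - 如果同一优先级下出现多个不同 constraint_type，则报错（需求：不一样报错）
--     - 如果没有限制使用该优先级，则映射由调用方填 NULL
--     """
--     mapping: Dict[int, List[str]] = defaultdict(list)
--
--     for constraint_type in ['stage', 'media', 'adType', 'marketingFunnel']: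
--         for cfg in constraint_config.get(constraint_type, []):
--             priority = int(cfg.get('priority', 999))
--             if 1 <= priority <= 6:
--                 if constraint_type not in mapping[priority]:
--                     mapping[priority].append(constraint_type)
--
--     result: Dict[int, str] = {}
--     for p in range(1, 7):
--         types = mapping.get(p, [])
--         if not types:
--             continue
--         if len(types) > 1:
--             raise ValueError(f"限制优先级 P{p} 对应多个限制类型: {types}")
--         result[p] = types[0]
--     return result
-- ===== SOURCE B (Python) =====
-- def compute_constraint_priority_mapping(constraint_config):
--     """Priority-first scan: for each p in 1..6, collect the constraint types
--     configured with that priority; error on a conflict, else record the one type."""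
--     CONSTRAINT_TYPES = ['stage', 'media', 'adType', 'marketingFunnel']
--     result = {}
--     for p in range(1, 7):
--         types = [t for t in CONSTRAINT_TYPES
--                  if any(int(cfg.get('priority', 999)) == p
--                         for cfg in constraint_config.get(t, []))]
--         if not types:
--             continue
--         if len(types) > 1:
--             raise ValueError(f"限制优先级 P{p} 对应多个限制类型: {types}")
--         result[p] = types[0]
--     return result
-- ===== Notes on version B (the rewrite author's own statement) =====
-- stated objective: alternative
-- what changed: Replaced A's two-phase defaultdict index (scan types grouping by priority, then pass over range(1,7)) by a single priority-first loop: for each p in 1..6 scan the four constraint types in fixed order and collect those configured with priority p.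
import Mathlib
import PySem

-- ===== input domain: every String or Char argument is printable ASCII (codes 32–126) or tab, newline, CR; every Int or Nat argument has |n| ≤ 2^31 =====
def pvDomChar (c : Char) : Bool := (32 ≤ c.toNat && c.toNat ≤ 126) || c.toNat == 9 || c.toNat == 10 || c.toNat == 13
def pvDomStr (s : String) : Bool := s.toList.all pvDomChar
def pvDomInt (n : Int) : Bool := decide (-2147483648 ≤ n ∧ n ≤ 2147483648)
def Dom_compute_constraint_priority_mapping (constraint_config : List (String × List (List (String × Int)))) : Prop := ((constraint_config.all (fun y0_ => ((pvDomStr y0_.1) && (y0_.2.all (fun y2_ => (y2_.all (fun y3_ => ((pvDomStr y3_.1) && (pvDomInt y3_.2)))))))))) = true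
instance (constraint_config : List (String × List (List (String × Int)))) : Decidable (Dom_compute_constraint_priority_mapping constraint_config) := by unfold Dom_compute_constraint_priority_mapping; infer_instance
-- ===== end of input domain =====

-- B replaces A's two-phase defaultdict grouping with a single priority-first scan
-- over p = 1..6 (alternative decomposition, same cost; equivalence of RETURN values).

-- the four constraint type names, in A's (and B's) fixed scan order
def pvTypes : List String := ["stage", "media", "adType", "marketingFunnel"]

-- int(cfg.get('priority', 999)) — the value is already an int, so int() is the identity
def pvPrio (cfg : List (String × Int)) : Int :=
  PySem.Dict.getD (PySem.Dict.mk cfg) "priority" 999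

-- ===== PORT A =====
-- the guarded bucket update `if 1 <= priority <= 6: … mapping[priority].append(…)`
def pvBucketAdd (t : String) (q : Int) (m : PySem.Dict Int (List String)) :
    PySem.Dict Int (List String) :=
  if 1 ≤ q ∧ q ≤ 6 then
    let lst := PySem.Dict.getD m q []                 -- defaultdict access mapping[priority]
    let m1 := PySem.Dict.insert m q lst               -- (materializes the defaultdict entry)
    if t ∈ lst then m1 else PySem.Dict.insert m1 q (lst ++ [t])
  else m

-- body of A's inner loop: `for cfg in constraint_config.get(constraint_type, []): …`
def pvAStep (t : String) (m : PySem.Dict Int (List String)) (cfg : List (String × Int)) :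
    PySem.Dict Int (List String) :=
  pvBucketAdd t (pvPrio cfg) m

def compute_constraint_priority_mapping (constraint_config : List (String × List (List (String × Int)))) : List (Int × String) :=
  let ccd := PySem.Dict.mk constraint_config
  let mapping : PySem.Dict Int (List String) :=
    pvTypes.foldl (fun m t => (PySem.Dict.getD ccd t []).foldl (pvAStep t) m) PySem.Dict.empty
  let result : PySem.Dict Int String :=
    (PySem.List.pyRange 1 7 1).foldl (fun res p =>
      let types := PySem.Dict.getD mapping p []
      if types = [] then res
      else if 1 < types.length then res               -- Python raises ValueError here (outside Pre_)
      else PySem.Dict.insert res p (types.headD "")) PySem.Dict.empty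
  result.items

-- ===== PORT B =====
def compute_constraint_priority_mapping_alt (constraint_config : List (String × List (List (String × Int)))) : List (Int × String) :=
  let ccd := PySem.Dict.mk constraint_config
  ((PySem.List.pyRange 1 7 1).foldl (fun res p =>
      let types := pvTypes.filter (fun t =>
        (PySem.Dict.getD ccd t []).any (fun cfg => pvPrio cfg == p))
      if types = [] then res
      else if 1 < types.length then res               -- Python raises ValueError here (outside Pre_)
      else PySem.Dict.insert res p (types.headD "")) PySem.Dict.empty).items

-- ===== PRECONDITION & SPEC =====
-- A (and B alike) raises ValueError when two distinct constraint types carry the same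
-- priority p ∈ 1..6; Pre_ admits exactly the inputs where the Python A returns.
def Pre_compute_constraint_priority_mapping (constraint_config : List (String × List (List (String × Int)))) : Prop :=
  ∀ p ∈ ([1, 2, 3, 4, 5, 6] : List Int),
    (pvTypes.filter (fun t =>
      (PySem.Dict.getD (PySem.Dict.mk constraint_config) t []).any
        (fun cfg => pvPrio cfg == p))).length ≤ 1
instance (constraint_config : List (String × List (List (String × Int)))) : Decidable (Pre_compute_constraint_priority_mapping constraint_config) := by unfold Pre_compute_constraint_priority_mapping; infer_instance

def pvWitness_compute_constraint_priority_mapping : (List (String × List (List (String × Int)))) :=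
  [("stage", [[("priority", 1)]]), ("media", [[("priority", 3)], []]), ("other", [[("priority", 1)]])]

def Spec_compute_constraint_priority_mapping (constraint_config : List (String × List (List (String × Int)))) (out : List (Int × String)) : Prop := out = compute_constraint_priority_mapping_alt constraint_config
instance (constraint_config : List (String × List (List (String × Int)))) (out : List (Int × String)) : Decidable (Spec_compute_constraint_priority_mapping constraint_config out) := by unfold Spec_compute_constraint_priority_mapping; infer_instance

-- ===== CLAIM (what is proved, stated in full; the proofs are below) =====
def Claim_equal_compute_constraint_priority_mapping : Prop := ∀ (constraint_config : List (String × List (List (String × Int)))), Dom_compute_constraint_priority_mapping constraint_config → Pre_compute_constraint_priority_mapping constraint_config → Spec_compute_constraint_priority_mapping constraint_config (compute_constraint_priority_mapping constraint_config)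

-- ===== LEMMAS AND PROOFS =====

theorem pvBucketAdd_getD (t : String) (q : Int) (m : PySem.Dict Int (List String)) (p : Int) :
    PySem.Dict.getD (pvBucketAdd t q m) p [] =
      if p = q ∧ (1 ≤ p ∧ p ≤ 6) ∧ t ∉ PySem.Dict.getD m p [] then
        PySem.Dict.getD m p [] ++ [t]
      else PySem.Dict.getD m p [] := by
  unfold pvBucketAdd
  by_cases hpq : p = q
  · subst hpq
    by_cases hq : 1 ≤ p ∧ p ≤ 6
    · by_cases ht : t ∈ PySem.Dict.getD m p []
      · simp [hq, ht, PySem.Dict.getD_insert]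
      · simp [hq, ht, PySem.Dict.getD_insert]
    · simp [hq]
  · by_cases hq : 1 ≤ q ∧ q ≤ 6
    · by_cases ht : t ∈ PySem.Dict.getD m q []
      · simp [hq, ht, PySem.Dict.getD_insert, hpq]
      · simp [hq, ht, PySem.Dict.getD_insert, hpq]
    · simp [hq, hpq]

-- after A's inner loop over the cfg list L of type t, the bucket of every priority p
theorem pvInner_getD (t : String) (L : List (List (String × Int)))
    (m : PySem.Dict Int (List String)) (p : Int) :
    PySem.Dict.getD (L.foldl (pvAStep t) m) p [] =
      if t ∈ PySem.Dict.getD m p [] then PySem.Dict.getD m p []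
      else PySem.Dict.getD m p [] ++
        (if (1 ≤ p ∧ p ≤ 6) ∧ L.any (fun cfg => pvPrio cfg == p) then [t] else []) := by
  induction L generalizing m with
  | nil => simp
  | cons cfg L ih =>
    simp only [List.foldl_cons, List.any_cons]
    rw [ih]
    have hstep := pvBucketAdd_getD t (pvPrio cfg) m p
    rw [show pvAStep t m cfg = pvBucketAdd t (pvPrio cfg) m from rfl]
    by_cases hc : p = pvPrio cfg ∧ (1 ≤ p ∧ p ≤ 6) ∧ t ∉ PySem.Dict.getD m p []
    · have hA : PySem.Dict.getD (pvBucketAdd t (pvPrio cfg) m) p [] =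
          PySem.Dict.getD m p [] ++ [t] := by rw [hstep, if_pos hc]
      obtain ⟨hpq, hrange, ht⟩ := hc
      have hbeq : (pvPrio cfg == p) = true := by simp [hpq]
      rw [hA, if_pos (by simp : t ∈ PySem.Dict.getD m p [] ++ [t]), if_neg ht]
      simp [hbeq, hrange]
    · have hA : PySem.Dict.getD (pvBucketAdd t (pvPrio cfg) m) p [] =
          PySem.Dict.getD m p [] := by rw [hstep, if_neg hc]
      rw [hA]
      by_cases ht : t ∈ PySem.Dict.getD m p []
      · simp [ht]
      · rw [if_neg ht, if_neg ht]
        congr 1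
        by_cases hrange : 1 ≤ p ∧ p ≤ 6
        · have hpq : p ≠ pvPrio cfg := fun h => hc ⟨h, hrange, ht⟩
          have hbeq : (pvPrio cfg == p) = false := by
            simp only [beq_eq_false_iff_ne, ne_eq]
            exact fun h => hpq h.symm
          simp [hbeq]
        · simp [hrange]

-- after A's outer loop over a duplicate-free list ts of type names
theorem pvOuter_getD (ccd : PySem.Dict String (List (List (String × Int))))
    (ts : List String) (m : PySem.Dict Int (List String)) (p : Int)
    (hnd : ts.Nodup) (hfresh : ∀ t ∈ ts, t ∉ PySem.Dict.getD m p []) :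
    PySem.Dict.getD
      (ts.foldl (fun m t => (PySem.Dict.getD ccd t []).foldl (pvAStep t) m) m) p [] =
      PySem.Dict.getD m p [] ++
        (if 1 ≤ p ∧ p ≤ 6 then
          ts.filter (fun t => (PySem.Dict.getD ccd t []).any (fun cfg => pvPrio cfg == p))
         else []) := by
  induction ts generalizing m with
  | nil => simp
  | cons t ts ih =>
    simp only [List.foldl_cons, List.filter_cons]
    have ht : t ∉ PySem.Dict.getD m p [] := hfresh t (by simp)
    have hstep : PySem.Dict.getD ((PySem.Dict.getD ccd t []).foldl (pvAStep t) m) p [] =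
        PySem.Dict.getD m p [] ++
          (if (1 ≤ p ∧ p ≤ 6) ∧ (PySem.Dict.getD ccd t []).any (fun cfg => pvPrio cfg == p)
           then [t] else []) := by
      rw [pvInner_getD, if_neg ht]
    have hnd' : ts.Nodup := hnd.of_cons
    have hfresh' : ∀ t' ∈ ts,
        t' ∉ PySem.Dict.getD ((PySem.Dict.getD ccd t []).foldl (pvAStep t) m) p [] := by
      intro t' h'
      rw [hstep]
      simp only [List.mem_append]
      rintro (h | h)
      · exact hfresh t' (by simp [h']) h
      · have hne : t' ≠ t := fun e => (List.nodup_cons.mp hnd).1 (e ▸ h')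
        revert h; split <;> simp_all
    rw [ih _ hnd' hfresh', hstep]
    by_cases hp : 1 ≤ p ∧ p ≤ 6
    · simp only [hp, and_true, true_and, if_true]
      by_cases ha : (PySem.Dict.getD ccd t []).any (fun cfg => pvPrio cfg == p) = true
      · simp [ha, List.append_assoc]
      · simp only [Bool.not_eq_true] at ha
        simp [ha]
    · simp [hp]

-- the bucket A's second phase reads equals the list B computes directly
theorem pvMapping_eq (constraint_config : List (String × List (List (String × Int)))) (p : Int)
    (hp : 1 ≤ p ∧ p ≤ 6) :
    PySem.Dict.getD
      (pvTypes.foldl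
        (fun m t => (PySem.Dict.getD (PySem.Dict.mk constraint_config) t []).foldl (pvAStep t) m)
        PySem.Dict.empty) p [] =
      pvTypes.filter (fun t =>
        (PySem.Dict.getD (PySem.Dict.mk constraint_config) t []).any
          (fun cfg => pvPrio cfg == p)) := by
  rw [pvOuter_getD _ _ _ _ (by decide) (by simp [PySem.Dict.getD_empty])]
  simp [hp, PySem.Dict.getD_empty]

-- ===== VERDICT (by name: the statement is the Claim_ definition above) =====
theorem compute_constraint_priority_mapping_spec : Claim_equal_compute_constraint_priority_mapping := by
  intro cc _ _
  unfold Spec_compute_constraint_priority_mapping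
  unfold compute_constraint_priority_mapping compute_constraint_priority_mapping_alt
  have hr : PySem.List.pyRange 1 7 1 = ([1, 2, 3, 4, 5, 6] : List Int) := by decide
  rw [hr]
  dsimp only
  congr 1
  apply PySem.List.foldl_congr_mem
  intro res p hp
  have hp' : 1 ≤ p ∧ p ≤ 6 := by fin_cases hp <;> omega
  rw [pvMapping_eq cc p hp']
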